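-- pv_equiv track=rewrite | github.com/cu-swe4s-fall-2020/python-refresher-anmc9115 | my_utils.py | get_daily_count
-- ===== SOURCE A (Python) =====
-- def get_daily_count(results):
--     """Takes an array of cumulative values and computes daily values
--
--     Parameters
--     ----------
--     results: int list
--             a list of cumulative values
--
--     Returns
--     --------
--     daily_count: int array
--             values of specified column adjusted to daily
--             rather than cumulative values
--     """
--
--     flat_results = []
--
--     # converts list of lists to flat int list
--     for sublist in results:
--         for item in sublist:
--             flat_results.append(int(item))
--
--     daily_count = []
--
--     # Fills array with daily count
--     for i in range(len(flat_results)):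
--         if i == 0:
--             daily_count.append(flat_results[i])
--         else:
--             daily_count.append(flat_results[i] - flat_results[i-1])
--     return daily_count
-- ===== SOURCE B (Python) =====
-- def get_daily_count(results):
--     """Single streaming pass with a running previous value; no intermediate
--     flat list and no index branch: prev starts at 0, so daily[0] == flat[0]."""
--     daily = []
--     prev = 0
--     for sublist in results:
--         for item in sublist:
--             v = int(item)
--             daily.append(v - prev)
--             prev = v
--     return daily
-- ===== Notes on version B (the rewrite author's own statement) =====
-- stated objective: simpler
-- what changed: Replaced A's two staged passes (flatten into a list, then an index-based loop with an i==0 branch reaching back to flat[i-1]) by one streaming pass over the nested input carrying a running previous-value accumulator, building no intermediate flat list and needing no branch since prev starts at 0.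
import Mathlib
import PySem

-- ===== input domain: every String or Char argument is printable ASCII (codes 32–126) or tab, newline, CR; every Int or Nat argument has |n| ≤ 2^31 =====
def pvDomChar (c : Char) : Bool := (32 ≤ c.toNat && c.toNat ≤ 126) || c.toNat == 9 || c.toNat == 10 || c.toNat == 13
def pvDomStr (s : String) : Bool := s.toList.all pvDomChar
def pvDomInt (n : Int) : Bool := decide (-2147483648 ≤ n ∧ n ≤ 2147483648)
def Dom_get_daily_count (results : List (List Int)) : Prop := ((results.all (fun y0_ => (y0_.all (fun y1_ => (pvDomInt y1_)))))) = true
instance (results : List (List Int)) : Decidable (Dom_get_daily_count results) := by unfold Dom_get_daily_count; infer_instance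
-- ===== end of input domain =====

-- B replaces A's two staged passes (flatten, then an indexed loop with an i==0 branch) by one
-- streaming pass over the nested input carrying a running previous value; objective: simpler.

-- ===== PORT A =====
def get_daily_count (results : List (List Int)) : List Int :=
  let flat_results :=
    results.foldl (fun acc sublist => sublist.foldl (fun a item => a ++ [item]) acc) []
  (PySem.List.pyRange 0 flat_results.length 1).foldl
    (fun daily_count i =>
      if i = 0 then daily_count ++ [PySem.List.pyGetD flat_results i 0]
      else daily_count ++ [PySem.List.pyGetD flat_results i 0 - PySem.List.pyGetD flat_results (i - 1) 0])
    []

-- ===== PORT B =====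
def get_daily_count_alt (results : List (List Int)) : List Int :=
  (results.foldl
    (fun st sublist =>
      sublist.foldl (fun st v => (st.1 ++ [v - st.2], v)) st)
    (([] : List Int), (0 : Int))).1

-- ===== PRECONDITION & SPEC =====
def Spec_get_daily_count (results : List (List Int)) (out : List Int) : Prop := out = get_daily_count_alt results
instance (results : List (List Int)) (out : List Int) : Decidable (Spec_get_daily_count results out) := by unfold Spec_get_daily_count; infer_instance

-- ===== CLAIM (what is proved, stated in full; the proofs are below) =====
def Claim_equal_get_daily_count : Prop := ∀ (results : List (List Int)), Dom_get_daily_count results → Spec_get_daily_count results (get_daily_count results)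

-- ===== LEMMAS AND PROOFS =====

-- consecutive differences of xs with previous value p (proof-only characterisation)
def pvDiffs (p : Int) : List Int → List Int
  | [] => []
  | x :: xs => (x - p) :: pvDiffs x xs

theorem pv_flat_eq (results : List (List Int)) :
    results.foldl (fun acc sublist => sublist.foldl (fun a item => a ++ [item]) acc) []
      = results.flatMap (fun sublist => sublist) := by
  have inner : ∀ (sub acc : List Int), sub.foldl (fun a item => a ++ [item]) acc = acc ++ sub := by
    intro sub
    induction sub with
    | nil => simp
    | cons x xs ih => intro acc; simp [List.foldl, ih]
  have gen : ∀ (rs : List (List Int)) (acc : List Int),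
      rs.foldl (fun acc sublist => sublist.foldl (fun a item => a ++ [item]) acc) acc
        = acc ++ rs.flatMap (fun sublist => sublist) := by
    intro rs
    induction rs with
    | nil => simp
    | cons s ss ih => intro acc; rw [List.foldl_cons, inner, ih]; simp
  simpa using gen results []

-- B's inner streaming fold over a single list, characterised by pvDiffs
theorem pv_stream_inner (xs : List Int) :
    ∀ (acc : List Int) (p : Int),
      xs.foldl (fun st v => (st.1 ++ [v - st.2], v)) (acc, p)
        = (acc ++ pvDiffs p xs, (xs.getLast?).getD p) := by
  induction xs with
  | nil => intro acc p; simp [pvDiffs]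
  | cons x xs ih =>
    intro acc p
    simp only [List.foldl_cons, pvDiffs, ih]
    cases xs with
    | nil => simp [pvDiffs]
    | cons y ys =>
      simp only [List.append_assoc, List.singleton_append, Prod.mk.injEq, true_and]
      cases hys : (y :: ys).getLast? with
      | none => simp at hys
      | some z => simp [List.getLast?_cons_cons, hys]

-- B's nested fold equals the streaming fold over the flattened list
theorem pv_stream_nested (results : List (List Int)) :
    ∀ (st : List Int × Int),
      results.foldl (fun st sublist => sublist.foldl (fun st v => (st.1 ++ [v - st.2], v)) st) st
        = (results.flatMap (fun sublist => sublist)).foldl (fun st v => (st.1 ++ [v - st.2], v)) st := by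
  induction results with
  | nil => intro st; simp
  | cons s ss ih => intro st; simp [List.foldl_cons, List.flatMap_cons, List.foldl_append, ih]

-- pvDiffs as a zipWith of the list with its tail
theorem pv_diffs_zip (xs : List Int) :
    ∀ (x : Int), pvDiffs x xs = List.zipWith (fun prev cur => cur - prev) (x :: xs) xs := by
  induction xs with
  | nil => intro x; simp [pvDiffs]
  | cons y ys ih => intro x; simp [pvDiffs, ih]

theorem pv_loop_eq_map (flat : List Int) :
    (PySem.List.pyRange 0 flat.length 1).foldl
      (fun daily_count i =>
        if i = 0 then daily_count ++ [PySem.List.pyGetD flat i 0]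
        else daily_count ++ [PySem.List.pyGetD flat i 0 - PySem.List.pyGetD flat (i - 1) 0])
      []
    = (List.range flat.length).map
        (fun k => if k = 0 then flat.getD 0 0 else flat.getD k 0 - flat.getD (k - 1) 0) := by
  have key : ∀ (l : List Int) (init : List Int),
      l.foldl (fun daily_count i =>
        if i = 0 then daily_count ++ [PySem.List.pyGetD flat i 0]
        else daily_count ++ [PySem.List.pyGetD flat i 0 - PySem.List.pyGetD flat (i - 1) 0]) init
      = init ++ l.map (fun i =>
          if i = 0 then PySem.List.pyGetD flat i 0
          else PySem.List.pyGetD flat i 0 - PySem.List.pyGetD flat (i - 1) 0) := by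
    intro l
    induction l with
    | nil => simp
    | cons x xs ih =>
      intro init
      by_cases h : x = 0 <;> simp [List.foldl, h, ih]
  rw [PySem.List.pyRange_one, key]
  simp only [List.nil_append, List.map_map]
  apply List.map_congr_left
  intro k _
  by_cases hk : k = 0
  · simp [hk, PySem.List.pyGetD_zero]
  · have h1 : (0 : Int) + (k : Int) ≠ 0 := by
      have : 0 < k := Nat.pos_of_ne_zero hk
      omega
    have h2 : (0 : Int) + (k : Int) - 1 = ((k - 1 : Nat) : Int) := by
      have : 0 < k := Nat.pos_of_ne_zero hk
      omega
    simp only [Function.comp, h1, hk]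
    rw [h2]
    have h3 : (0 : Int) + (k : Int) = ((k : Nat) : Int) := by omega
    rw [h3]
    simp [PySem.List.pyGetD_natCast]

theorem pv_map_eq_diffs (flat : List Int) :
    (List.range flat.length).map
        (fun k => if k = 0 then flat.getD 0 0 else flat.getD k 0 - flat.getD (k - 1) 0)
      = pvDiffs 0 flat := by
  match flat with
  | [] => simp [pvDiffs]
  | x :: tl =>
    rw [show pvDiffs 0 (x :: tl) = (x - 0) :: pvDiffs x tl from rfl, pv_diffs_zip]
    apply List.ext_getElem
    · simp [List.length_zipWith]
    · intro i h1 h2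
      simp only [List.getElem_map, List.getElem_range]
      match i with
      | 0 => simp
      | Nat.succ j =>
        have hj : j < tl.length := by
          simp [List.length_zipWith] at h2; omega
        simp only [List.getElem_cons_succ, List.getElem_zipWith]
        have hij : j + 1 ≠ 0 := by omega
        rw [if_neg hij]
        have hlt : j + 1 < (x :: tl).length := by simp; omega
        rw [List.getD_eq_getElem _ _ hlt, List.getD_eq_getElem _ _ (by simp; omega : j + 1 - 1 < (x :: tl).length)]
        simp

-- ===== VERDICT (by name: the statement is the Claim_ definition above) =====
theorem get_daily_count_spec : Claim_equal_get_daily_count := by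
  intro results _
  unfold Spec_get_daily_count get_daily_count get_daily_count_alt
  simp only [pv_flat_eq, pv_stream_nested, pv_stream_inner, pv_loop_eq_map, pv_map_eq_diffs,
    List.nil_append]
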